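-- pv_equiv track=rewrite | github.com/161sam/smolotchi | smolotchi/engines/tools_engine.py | _extract_stage_request_id
-- ===== SOURCE A (Python) =====
-- def _extract_stage_request_id(note: str | None) -> str | None:
--     if not note:
--         return None
--     cleaned = note.replace("(", " ").replace(")", " ")
--     for part in cleaned.split():
--         if part.startswith("stage_req:"):
--             return part.split("stage_req:", 1)[1].strip()
--         if part.startswith("request_id="):
--             return part.split("request_id=", 1)[1].strip()
--         if part.startswith("req:"):
--             return part.split("req:", 1)[1].strip()
--     return None
-- ===== SOURCE B (Python) =====
-- _PREFIXES = ("stage_req:", "request_id=", "req:")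
--
--
-- def _extract_stage_request_id(note):
--     if not note:
--         return None
--     i, n = 0, len(note)
--     while i < n:
--         c = note[i]
--         if c.isspace() or c == "(" or c == ")":
--             i += 1
--             continue
--         j = i
--         while j < n and not (note[j].isspace() or note[j] == "(" or note[j] == ")"):
--             j += 1
--         token = note[i:j]
--         for p in _PREFIXES:
--             if token.startswith(p):
--                 return token[len(p):]
--         i = j
--     return None
-- ===== Notes on version B (the rewrite author's own statement) =====
-- stated objective: alternative
-- what changed: Replaces A's replace-parens/str.split()/token-loop pipeline by a single left-to-right index scan over the original string that treats whitespace and parentheses as separators directly and checks the three prefixes from one tuple, building no cleaned string and no token list.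
import Mathlib
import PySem

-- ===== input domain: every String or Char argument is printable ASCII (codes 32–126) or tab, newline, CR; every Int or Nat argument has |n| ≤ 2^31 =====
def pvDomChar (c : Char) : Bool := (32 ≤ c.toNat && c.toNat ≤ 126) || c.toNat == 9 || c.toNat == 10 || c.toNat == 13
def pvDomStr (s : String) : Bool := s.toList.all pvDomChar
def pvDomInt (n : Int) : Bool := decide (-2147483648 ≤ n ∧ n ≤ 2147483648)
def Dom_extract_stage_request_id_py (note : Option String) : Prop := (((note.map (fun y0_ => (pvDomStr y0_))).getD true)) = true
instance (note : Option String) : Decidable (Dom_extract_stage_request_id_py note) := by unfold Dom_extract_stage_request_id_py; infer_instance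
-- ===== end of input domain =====

-- B replaces A's replace/split/token-loop pipeline by a single left-to-right character scan
-- (whitespace and parens treated as separators directly, no intermediate strings); objective: alternative.

-- the three request-id prefixes, in A's (and B's) priority order
def pvP1 : List Char := "stage_req:".toList
def pvP2 : List Char := "request_id=".toList
def pvP3 : List Char := "req:".toList

-- ===== PORT A =====
-- the `for part in cleaned.split(): …` loop; `part.split(sep, 1)[1].strip()` is ported with
-- PySem.Chars.splitOnMax / PySem.List.pyGet? / PySem.Chars.strip (the pyGet? none case is
-- unreachable: the branch is guarded by startswith, so piece 1 always exists)
def pvTokenLoopA : List (List Char) → Option (List Char)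
  | [] => none
  | part :: rest =>
    if PySem.Chars.startswith part pvP1 then
      (PySem.List.pyGet? (PySem.Chars.splitOnMax part pvP1 1) 1).map PySem.Chars.strip
    else if PySem.Chars.startswith part pvP2 then
      (PySem.List.pyGet? (PySem.Chars.splitOnMax part pvP2 1) 1).map PySem.Chars.strip
    else if PySem.Chars.startswith part pvP3 then
      (PySem.List.pyGet? (PySem.Chars.splitOnMax part pvP3 1) 1).map PySem.Chars.strip
    else pvTokenLoopA rest

def extract_stage_request_id_py (note : Option String) : Option String :=
  match note with
  | none => none
  | some s =>
    if s.toList.isEmpty then none      -- `if not note: return None` (None or empty string)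
    else
      let cleaned := PySem.Chars.replace (PySem.Chars.replace s.toList ['('] [' ']) [')'] [' ']
      (pvTokenLoopA (PySem.Chars.split₀ cleaned)).map String.ofList

-- ===== PORT B =====
-- `c.isspace() or c == "(" or c == ")"`
def pvSep (c : Char) : Bool := PySem.Chars.isspace c || c == '(' || c == ')'

-- `for p in _PREFIXES: if token.startswith(p): return token[len(p):]`
def pvTryPrefixes (tok : List Char) : Option (List Char) :=
  [pvP1, pvP2, pvP3].findSome? fun p =>
    if PySem.Chars.startswith tok p then some (PySem.List.slice tok (some (p.length : Int)) none)
    else none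

-- the outer `while i < n` scan; the inner `while j < n and not sep(...)` loop is the
-- takeWhile/dropWhile pair (token = note[i:j], then i = j)
def pvScanB : List Char → Option (List Char)
  | [] => none
  | c :: rest =>
    if pvSep c then pvScanB rest
    else
      match pvTryPrefixes (c :: rest.takeWhile (fun d => !pvSep d)) with
      | some suf => some suf
      | none => pvScanB (rest.dropWhile (fun d => !pvSep d))
termination_by l => l.length
decreasing_by
  · simp
  · simpa using Nat.lt_succ_of_le (List.length_dropWhile_le _ _)

def extract_stage_request_id_py_alt (note : Option String) : Option String :=
  match note with
  | none => none
  | some s =>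
    if s.toList.isEmpty then none      -- `if not note: return None`
    else (pvScanB s.toList).map String.ofList

-- ===== PRECONDITION & SPEC =====
def Spec_extract_stage_request_id_py (note : Option String) (out : Option String) : Prop := out = extract_stage_request_id_py_alt note
instance (note : Option String) (out : Option String) : Decidable (Spec_extract_stage_request_id_py note out) := by unfold Spec_extract_stage_request_id_py; infer_instance

-- ===== CLAIM (what is proved, stated in full; the proofs are below) =====
def Claim_equal_extract_stage_request_id_py : Prop := ∀ (note : Option String), Dom_extract_stage_request_id_py note → Spec_extract_stage_request_id_py note (extract_stage_request_id_py note)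

-- ===== LEMMAS AND PROOFS =====

-- the combined effect of A's two one-char replaces
def pvSub (c : Char) : Char := if c = '(' ∨ c = ')' then ' ' else c

theorem pv_replace_go (o n : Char) : ∀ (fuel : Nat) (l acc : List Char), l.length ≤ fuel →
    PySem.Chars.replace.go [o] [n] fuel l acc
      = acc.reverse ++ l.map (fun c => if o = c then n else c) := by
  intro fuel
  induction fuel with
  | zero =>
    intro l acc h
    have : l = [] := List.eq_nil_of_length_eq_zero (Nat.le_zero.mp h)
    subst this; simp [PySem.Chars.replace.go]
  | succ f ih =>
    intro l acc h
    cases l with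
    | nil => simp [PySem.Chars.replace.go]
    | cons c t =>
      have step : PySem.Chars.replace.go [o] [n] (f+1) (c :: t) acc
          = if o = c then PySem.Chars.replace.go [o] [n] f t (n :: acc)
            else PySem.Chars.replace.go [o] [n] f t (c :: acc) := by
        simp [PySem.Chars.replace.go, List.isPrefixOf]
      rw [step]
      have ht : t.length ≤ f := by simpa using h
      split_ifs with hc <;> rw [ih _ _ ht] <;> simp [hc]

theorem pv_replace (o n : Char) (cs : List Char) :
    PySem.Chars.replace cs [o] [n] = cs.map (fun c => if o = c then n else c) := by
  unfold PySem.Chars.replace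
  simp [pv_replace_go o n cs.length cs [] le_rfl]

theorem pv_clean (cs : List Char) :
    PySem.Chars.replace (PySem.Chars.replace cs ['('] [' ']) [')'] [' '] = cs.map pvSub := by
  rw [pv_replace, pv_replace, List.map_map]
  refine List.map_congr_left fun c _ => ?_
  by_cases h1 : c = '('
  · subst h1; decide
  · by_cases h2 : c = ')'
    · subst h2; decide
    · simp [pvSub, h1, h2, Function.comp, eq_comm]

-- split₀.go unfolding
theorem pv_go_nil (cur : List Char) (acc : List (List Char)) :
    PySem.Chars.split₀.go [] cur acc
      = if cur.isEmpty then acc.reverse else (cur.reverse :: acc).reverse := rfl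

theorem pv_go_cons (c : Char) (rest cur : List Char) (acc : List (List Char)) :
    PySem.Chars.split₀.go (c :: rest) cur acc
      = if PySem.Chars.isspace c then
          (if cur.isEmpty then PySem.Chars.split₀.go rest [] acc
           else PySem.Chars.split₀.go rest [] (cur.reverse :: acc))
        else PySem.Chars.split₀.go rest (c :: cur) acc := by
  simp [PySem.Chars.split₀.go]

theorem pv_go_acc : ∀ (cs cur : List Char) (acc : List (List Char)),
    PySem.Chars.split₀.go cs cur acc = acc.reverse ++ PySem.Chars.split₀.go cs cur [] := by
  intro cs
  induction cs with
  | nil => intro cur acc; rw [pv_go_nil, pv_go_nil]; split_ifs <;> simp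
  | cons c rest ih =>
    intro cur acc
    rw [pv_go_cons, pv_go_cons]
    split_ifs with h1 h2
    · rw [ih [] acc]
    · rw [ih [] (cur.reverse :: acc), ih [] [cur.reverse]]; simp
    · rw [ih (c :: cur) acc]

theorem pv_split_space {c : Char} (h : PySem.Chars.isspace c = true) (cs : List Char) :
    PySem.Chars.split₀ (c :: cs) = PySem.Chars.split₀ cs := by
  unfold PySem.Chars.split₀
  rw [pv_go_cons]; simp [h]

theorem pv_go_tok : ∀ (cs cur : List Char), cur ≠ [] →
    PySem.Chars.split₀.go cs cur []
      = (cur.reverse ++ cs.takeWhile (fun d => !PySem.Chars.isspace d))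
          :: PySem.Chars.split₀ (cs.dropWhile (fun d => !PySem.Chars.isspace d)) := by
  intro cs
  induction cs with
  | nil =>
    intro cur hcur
    rw [pv_go_nil]
    simp [List.isEmpty_iff, hcur, PySem.Chars.split₀]
    rfl
  | cons c rest ih =>
    intro cur hcur
    rw [pv_go_cons]
    by_cases hc : PySem.Chars.isspace c
    · rw [if_pos hc, if_neg (by simp [List.isEmpty_iff, hcur])]
      rw [pv_go_acc]
      simp [List.takeWhile, List.dropWhile, hc, pv_split_space hc]
      rfl
    · rw [if_neg hc, ih (c :: cur) (by simp)]
      simp [List.takeWhile, List.dropWhile, hc]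

theorem pv_split_tok {c : Char} (h : PySem.Chars.isspace c = false) (cs : List Char) :
    PySem.Chars.split₀ (c :: cs)
      = (c :: cs.takeWhile (fun d => !PySem.Chars.isspace d))
          :: PySem.Chars.split₀ (cs.dropWhile (fun d => !PySem.Chars.isspace d)) := by
  unfold PySem.Chars.split₀
  rw [pv_go_cons, if_neg (by simp [h]), pv_go_tok _ [c] (by simp)]
  rfl

theorem pv_strip_id (l : List Char) (h : ∀ x ∈ l, PySem.Chars.isspace x = false) :
    PySem.Chars.strip l = l := by
  have hl : List.dropWhile PySem.Chars.isspace l = l :=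
    List.dropWhile_eq_self_iff.mpr (fun hl => by simp [h _ (List.getElem_mem hl)])
  have hr : List.dropWhile PySem.Chars.isspace l.reverse = l.reverse :=
    List.dropWhile_eq_self_iff.mpr (fun hl2 => by
      have hlen : l.length - 1 < l.length := by simp at hl2; omega
      simp [List.getElem_reverse, h _ (List.getElem_mem hlen)])
  unfold PySem.Chars.strip PySem.Chars.lstrip PySem.Chars.rstrip
  rw [hl, hr, List.reverse_reverse]

theorem pv_goStop (sep : List Char) (fuel : Nat) (l cur : List Char) (acc : List (List Char)) :
    PySem.Chars.splitOnMax.go sep fuel 0 l cur acc = ((cur.reverse ++ l) :: acc).reverse := by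
  cases fuel with
  | zero => rfl
  | succ f => cases l with
    | nil => simp [PySem.Chars.splitOnMax.go]
    | cons c r => simp [PySem.Chars.splitOnMax.go]

theorem pv_split1 (p t : List Char) (hp : p ≠ []) :
    PySem.Chars.splitOnMax (p ++ t) p 1 = [[], t] := by
  obtain ⟨c, p', rfl⟩ := List.exists_cons_of_ne_nil hp
  unfold PySem.Chars.splitOnMax
  rw [if_neg (by norm_num)]
  show PySem.Chars.splitOnMax.go (c :: p') (((c :: p') ++ t).length + 1) (Int.toNat 1)
        ((c :: p') ++ t) [] [] = [[], t]
  rw [show ((c :: p') ++ t) = c :: (p' ++ t) from rfl]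
  rw [show (c :: (p' ++ t)).length + 1 = ((c :: (p' ++ t)).length) + 1 from rfl]
  simp only [PySem.Chars.splitOnMax.go, Int.toNat]
  rw [if_neg (by omega), if_pos (by simp)]
  rw [show List.drop (c :: p').length (c :: (p' ++ t)) = t from by
    simp]
  rw [pv_goStop]
  rfl

theorem pv_branchA (p tok : List Char) (hp : p ≠ [])
    (hpre : PySem.Chars.startswith tok p = true)
    (hns : ∀ x ∈ tok, PySem.Chars.isspace x = false) :
    (PySem.List.pyGet? (PySem.Chars.splitOnMax tok p 1) 1).map PySem.Chars.strip
      = some (tok.drop p.length) := by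
  obtain ⟨t, rfl⟩ := (PySem.Chars.startswith_iff tok p).mp hpre
  rw [pv_split1 _ _ hp]
  have h1 : PySem.List.pyGet? [([] : List Char), t] 1 = some t := by
    simp [PySem.List.pyGet?, PySem.List.pyIdx?]
  rw [h1]
  simp only [Option.map_some]
  rw [pv_strip_id t (fun x hx => hns x (List.mem_append_right _ hx))]
  simp

theorem pv_sp_sub (d : Char) : PySem.Chars.isspace (pvSub d) = pvSep d := by
  by_cases h1 : d = '('
  · subst h1; decide
  · by_cases h2 : d = ')'
    · subst h2; decide
    · have e1 : (d == '(') = false := beq_eq_false_iff_ne.mpr h1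
      have e2 : (d == ')') = false := beq_eq_false_iff_ne.mpr h2
      unfold pvSub pvSep
      rw [if_neg (by rintro (rfl | rfl); exacts [h1 rfl, h2 rfl]), e1, e2]
      simp

theorem pv_sep_false {d : Char} (h : pvSep d = false) : pvSub d = d := by
  unfold pvSep at h
  unfold pvSub
  rw [if_neg]
  rintro (rfl | rfl) <;> simp at h

theorem pv_main : ∀ (n : Nat) (cs : List Char), cs.length ≤ n →
    pvTokenLoopA (PySem.Chars.split₀ (cs.map pvSub)) = pvScanB cs := by
  intro n
  induction n with
  | zero =>
    intro cs h
    have : cs = [] := List.eq_nil_of_length_eq_zero (Nat.le_zero.mp h)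
    subst this
    rw [List.map_nil, show pvScanB [] = none from by rw [pvScanB]]
    rfl
  | succ m ih =>
    intro cs h
    cases cs with
    | nil => rw [List.map_nil, show pvScanB [] = none from by rw [pvScanB]]; rfl
    | cons c rest =>
      by_cases hsep : pvSep c = true
      · have hsp : PySem.Chars.isspace (pvSub c) = true := by rw [pv_sp_sub]; exact hsep
        rw [List.map_cons, pv_split_space hsp]
        rw [show pvScanB (c :: rest) = pvScanB rest from by rw [pvScanB]; simp [hsep]]
        exact ih rest (by simpa using Nat.le_of_succ_le_succ h)
      · have hsepf : pvSep c = false := by simpa using hsep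
        have hnsp : PySem.Chars.isspace c = false := by
          unfold pvSep at hsepf; simp at hsepf; exact hsepf.1.1
        rw [List.map_cons, pv_sep_false hsepf, pv_split_tok hnsp]
        have hpred : (fun d => !PySem.Chars.isspace (pvSub d)) = (fun d => !pvSep d) := by
          funext d; rw [pv_sp_sub]
        have hTW : (rest.map pvSub).takeWhile (fun d => !PySem.Chars.isspace d)
            = rest.takeWhile (fun d => !pvSep d) := by
          rw [List.takeWhile_map]
          rw [show ((fun d => !PySem.Chars.isspace d) ∘ pvSub) = (fun d => !pvSep d) from by
            funext d; simp [Function.comp, pv_sp_sub]]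
          refine (List.map_congr_left fun x hx => ?_).trans (List.map_id _)
          exact pv_sep_false (by simpa using List.mem_takeWhile_imp hx)
        have hDW : (rest.map pvSub).dropWhile (fun d => !PySem.Chars.isspace d)
            = (rest.dropWhile (fun d => !pvSep d)).map pvSub := by
          rw [List.dropWhile_map]
          rw [show ((fun d => !PySem.Chars.isspace d) ∘ pvSub) = (fun d => !pvSep d) from by
            funext d; simp [Function.comp, pv_sp_sub]]
        rw [hTW, hDW]
        set tok := c :: rest.takeWhile (fun d => !pvSep d) with htok
        have htokns : ∀ x ∈ tok, PySem.Chars.isspace x = false := by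
          intro x hx
          rcases List.mem_cons.mp hx with rfl | hx'
          · exact hnsp
          · have : pvSep x = false := by simpa using List.mem_takeWhile_imp hx'
            unfold pvSep at this; simp at this; exact this.1.1
        have hrec : pvTokenLoopA (PySem.Chars.split₀ ((rest.dropWhile (fun d => !pvSep d)).map pvSub))
            = pvScanB (rest.dropWhile (fun d => !pvSep d)) :=
          ih _ (le_trans (List.length_dropWhile_le _ _) (Nat.le_of_succ_le_succ h))
        rw [show pvScanB (c :: rest)
            = (match pvTryPrefixes tok with
               | some suf => some suf
               | none => pvScanB (rest.dropWhile (fun d => !pvSep d))) from by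
          rw [pvScanB]; simp [hsepf, htok]]
        unfold pvTryPrefixes
        by_cases h1 : PySem.Chars.startswith tok pvP1 = true
        · rw [show pvTokenLoopA (tok :: PySem.Chars.split₀ ((rest.dropWhile (fun d => !pvSep d)).map pvSub))
              = (PySem.List.pyGet? (PySem.Chars.splitOnMax tok pvP1 1) 1).map PySem.Chars.strip from by
            rw [pvTokenLoopA]; simp [h1]]
          rw [pv_branchA pvP1 tok (by decide) h1 htokns]
          simp [List.findSome?, h1]
        · by_cases h2 : PySem.Chars.startswith tok pvP2 = true
          · rw [show pvTokenLoopA (tok :: PySem.Chars.split₀ ((rest.dropWhile (fun d => !pvSep d)).map pvSub))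
                = (PySem.List.pyGet? (PySem.Chars.splitOnMax tok pvP2 1) 1).map PySem.Chars.strip from by
              rw [pvTokenLoopA]; simp [h1, h2]]
            rw [pv_branchA pvP2 tok (by decide) h2 htokns]
            simp [List.findSome?, h1, h2]
          · by_cases h3 : PySem.Chars.startswith tok pvP3 = true
            · rw [show pvTokenLoopA (tok :: PySem.Chars.split₀ ((rest.dropWhile (fun d => !pvSep d)).map pvSub))
                  = (PySem.List.pyGet? (PySem.Chars.splitOnMax tok pvP3 1) 1).map PySem.Chars.strip from by
                rw [pvTokenLoopA]; simp [h1, h2, h3]]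
              rw [pv_branchA pvP3 tok (by decide) h3 htokns]
              simp [List.findSome?, h1, h2, h3]
            · rw [show pvTokenLoopA (tok :: PySem.Chars.split₀ ((rest.dropWhile (fun d => !pvSep d)).map pvSub))
                  = pvTokenLoopA (PySem.Chars.split₀ ((rest.dropWhile (fun d => !pvSep d)).map pvSub)) from by
                rw [pvTokenLoopA]; simp [h1, h2, h3]]
              rw [hrec]
              simp [List.findSome?, h1, h2, h3]

-- ===== VERDICT (by name: the statement is the Claim_ definition above) =====
theorem extract_stage_request_id_py_spec : Claim_equal_extract_stage_request_id_py := by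
  intro note _
  unfold Spec_extract_stage_request_id_py
  cases note with
  | none => rfl
  | some s =>
    unfold extract_stage_request_id_py extract_stage_request_id_py_alt
    by_cases hs : s.toList.isEmpty
    · simp [hs]
    · simp [hs, pv_clean, pv_main s.toList.length s.toList le_rfl]
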